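-- pv_equiv track=rewrite | github.com/prohor-n/prohorlabs | 3prohor.py | get_diagonal_regions
-- ===== SOURCE A (Python) =====
-- def get_diagonal_regions(n):
--     a1, a2, a3, a4 = [], [], [], []
--     for i in range(n):
--         for j in range(n):
--             if i < j and i + j < n - 1: a1.append((i, j))
--             elif i < j and i + j > n - 1: a2.append((i, j))
--             elif i > j and i + j > n - 1: a3.append((i, j))
--             elif i > j and i + j < n - 1: a4.append((i, j))
--     return a1, a2, a3, a4
-- ===== SOURCE B (Python) =====
-- def get_diagonal_regions(n):
--     a1 = [(i, j) for i in range(n) for j in range(i + 1, n - 1 - i)]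
--     a2 = [(i, j) for i in range(n) for j in range(max(i + 1, n - i), n)]
--     a3 = [(i, j) for i in range(n) for j in range(n - i, i)]
--     a4 = [(i, j) for i in range(n) for j in range(0, min(i, n - 1 - i))]
--     return a1, a2, a3, a4
-- ===== Notes on version B (the rewrite author's own statement) =====
-- stated objective: alternative
-- what changed: Replaced the single n-by-n double loop with four per-cell branch tests by four comprehensions whose inner j-range bounds are computed directly from each region's inequalities, so no per-pair branching remains.
import Mathlib
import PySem

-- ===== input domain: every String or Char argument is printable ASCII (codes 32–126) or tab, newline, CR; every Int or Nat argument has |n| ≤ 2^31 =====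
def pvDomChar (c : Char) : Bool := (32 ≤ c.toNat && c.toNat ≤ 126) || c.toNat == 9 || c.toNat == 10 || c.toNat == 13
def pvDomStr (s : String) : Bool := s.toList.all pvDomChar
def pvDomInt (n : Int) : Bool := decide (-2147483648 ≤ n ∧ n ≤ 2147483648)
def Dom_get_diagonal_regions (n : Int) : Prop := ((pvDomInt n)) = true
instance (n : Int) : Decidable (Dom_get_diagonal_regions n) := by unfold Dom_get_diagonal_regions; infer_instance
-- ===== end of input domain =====

-- B replaces the branch-per-cell double loop by four loops whose j-bounds are computed from each region's inequalities.

-- ===== PORT A =====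
def get_diagonal_regions (n : Int) : (List (Int × Int)) × (List (Int × Int)) × (List (Int × Int)) × (List (Int × Int)) :=
  (PySem.List.pyRange 0 n 1).foldl (fun s i =>
    (PySem.List.pyRange 0 n 1).foldl (fun s j =>
      if i < j ∧ i + j < n - 1 then (s.1 ++ [(i, j)], s.2.1, s.2.2.1, s.2.2.2)
      else if i < j ∧ i + j > n - 1 then (s.1, s.2.1 ++ [(i, j)], s.2.2.1, s.2.2.2)
      else if i > j ∧ i + j > n - 1 then (s.1, s.2.1, s.2.2.1 ++ [(i, j)], s.2.2.2)
      else if i > j ∧ i + j < n - 1 then (s.1, s.2.1, s.2.2.1, s.2.2.2 ++ [(i, j)])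
      else s) s) ([], [], [], [])

-- ===== PORT B =====
def get_diagonal_regions_alt (n : Int) : (List (Int × Int)) × (List (Int × Int)) × (List (Int × Int)) × (List (Int × Int)) :=
  ((PySem.List.pyRange 0 n 1).flatMap (fun i => (PySem.List.pyRange (i + 1) (n - 1 - i) 1).map (fun j => (i, j))),
   (PySem.List.pyRange 0 n 1).flatMap (fun i => (PySem.List.pyRange (max (i + 1) (n - i)) n 1).map (fun j => (i, j))),
   (PySem.List.pyRange 0 n 1).flatMap (fun i => (PySem.List.pyRange (n - i) i 1).map (fun j => (i, j))),
   (PySem.List.pyRange 0 n 1).flatMap (fun i => (PySem.List.pyRange 0 (min i (n - 1 - i)) 1).map (fun j => (i, j))))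

-- ===== PRECONDITION & SPEC =====
def Spec_get_diagonal_regions (n : Int) (out : (List (Int × Int)) × (List (Int × Int)) × (List (Int × Int)) × (List (Int × Int))) : Prop := out = get_diagonal_regions_alt n
instance (n : Int) (out : (List (Int × Int)) × (List (Int × Int)) × (List (Int × Int)) × (List (Int × Int))) : Decidable (Spec_get_diagonal_regions n out) := by unfold Spec_get_diagonal_regions; infer_instance

-- ===== CLAIM (what is proved, stated in full; the proofs are below) =====
def Claim_equal_get_diagonal_regions : Prop := ∀ (n : Int), Dom_get_diagonal_regions n → Spec_get_diagonal_regions n (get_diagonal_regions n)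

-- ===== LEMMAS AND PROOFS =====

-- A's inner j-loop appends to each component exactly the pairs of its (mutually exclusive) branch.
lemma inner_loop (n i : Int) (l : List Int) (a b c d : List (Int × Int)) :
    l.foldl (fun s j =>
      if i < j ∧ i + j < n - 1 then (s.1 ++ [(i, j)], s.2.1, s.2.2.1, s.2.2.2)
      else if i < j ∧ i + j > n - 1 then (s.1, s.2.1 ++ [(i, j)], s.2.2.1, s.2.2.2)
      else if i > j ∧ i + j > n - 1 then (s.1, s.2.1, s.2.2.1 ++ [(i, j)], s.2.2.2)
      else if i > j ∧ i + j < n - 1 then (s.1, s.2.1, s.2.2.1, s.2.2.2 ++ [(i, j)])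
      else s) (a, b, c, d)
    = (a ++ (l.filter (fun j => decide (i < j ∧ i + j < n - 1))).map (fun j => (i, j)),
       b ++ (l.filter (fun j => decide (i < j ∧ i + j > n - 1))).map (fun j => (i, j)),
       c ++ (l.filter (fun j => decide (i > j ∧ i + j > n - 1))).map (fun j => (i, j)),
       d ++ (l.filter (fun j => decide (i > j ∧ i + j < n - 1))).map (fun j => (i, j))) := by
  induction l generalizing a b c d with
  | nil => simp
  | cons j l ih =>
    rcases lt_trichotomy i j with hij | hij | hij <;>
      rcases lt_trichotomy (i + j) (n - 1) with hs | hs | hs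
    · rw [List.foldl_cons, if_pos ⟨hij, hs⟩, ih]
      simp [List.filter_cons, hij, hs, (show ¬ j < i by omega), (show ¬ n ≤ i + j by omega),
            List.append_assoc]
    · rw [List.foldl_cons, if_neg (by omega), if_neg (by omega), if_neg (by omega),
          if_neg (by omega), ih]
      simp [List.filter_cons, hij, (show ¬ i + j < n - 1 by omega), (show ¬ n ≤ i + j by omega),
            (show ¬ j < i by omega)]
    · rw [List.foldl_cons, if_neg (by omega), if_pos ⟨hij, hs⟩, ih]
      simp [List.filter_cons, hij, (show ¬ i + j < n - 1 by omega), (show n ≤ i + j by omega),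
            (show ¬ j < i by omega), List.append_assoc]
    · rw [List.foldl_cons, if_neg (by omega), if_neg (by omega), if_neg (by omega),
          if_neg (by omega), ih]
      simp [List.filter_cons, (show ¬ i < j by omega), (show ¬ j < i by omega)]
    · rw [List.foldl_cons, if_neg (by omega), if_neg (by omega), if_neg (by omega),
          if_neg (by omega), ih]
      simp [List.filter_cons, (show ¬ i < j by omega), (show ¬ j < i by omega)]
    · rw [List.foldl_cons, if_neg (by omega), if_neg (by omega), if_neg (by omega),
          if_neg (by omega), ih]
      simp [List.filter_cons, (show ¬ i < j by omega), (show ¬ j < i by omega)]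
    · rw [List.foldl_cons, if_neg (by omega), if_neg (by omega), if_neg (by omega),
          if_pos ⟨hij, hs⟩, ih]
      simp [List.filter_cons, hij, hs, (show ¬ i < j by omega), (show ¬ n ≤ i + j by omega),
            List.append_assoc]
    · rw [List.foldl_cons, if_neg (by omega), if_neg (by omega), if_neg (by omega),
          if_neg (by omega), ih]
      simp [List.filter_cons, hij, (show ¬ i < j by omega), (show ¬ i + j < n - 1 by omega),
            (show ¬ n ≤ i + j by omega)]
    · rw [List.foldl_cons, if_neg (by omega), if_neg (by omega), if_pos ⟨hij, hs⟩, ih]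
      simp [List.filter_cons, hij, (show ¬ i < j by omega), (show ¬ i + j < n - 1 by omega),
            (show n ≤ i + j by omega), List.append_assoc]

-- A fold that appends to each of the four components is componentwise a flatMap.
lemma quad_append_foldl (g1 g2 g3 g4 : Int → List (Int × Int)) (l : List Int)
    (a b c d : List (Int × Int)) :
    l.foldl (fun s i => (s.1 ++ g1 i, s.2.1 ++ g2 i, s.2.2.1 ++ g3 i, s.2.2.2 ++ g4 i)) (a, b, c, d)
    = (a ++ l.flatMap g1, b ++ l.flatMap g2, c ++ l.flatMap g3, d ++ l.flatMap g4) := by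
  induction l generalizing a b c d with
  | nil => simp
  | cons i l ih => simp [ih, List.flatMap_cons, List.append_assoc]

-- Filtering a range by a half-open interval condition is a range with clamped bounds.
lemma filter_pyRange_interval (a b lo hi : Int) :
    (PySem.List.pyRange a b 1).filter (fun j => decide (lo ≤ j ∧ j < hi))
    = PySem.List.pyRange (max a lo) (min b hi) 1 := by
  rcases le_or_gt (min b hi) (max a lo) with hqp | hpq
  · rw [PySem.List.pyRange_one_eq_nil hqp, List.filter_eq_nil_iff.mpr]
    intro j hj
    rw [PySem.List.mem_pyRange_one] at hj
    simp only [decide_eq_true_eq]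
    omega
  · rw [PySem.List.pyRange_one_append a (max a lo) b (le_max_left _ _) (by omega),
        PySem.List.pyRange_one_append (max a lo) (min b hi) b (le_of_lt hpq) (min_le_left _ _),
        List.filter_append, List.filter_append,
        List.filter_eq_nil_iff.mpr (fun j hj => by
          rw [PySem.List.mem_pyRange_one] at hj; simp only [decide_eq_true_eq]; omega),
        List.filter_eq_self.mpr (fun j hj => by
          rw [PySem.List.mem_pyRange_one] at hj; simp only [decide_eq_true_eq]; omega),
        List.filter_eq_nil_iff.mpr (fun j hj => by
          rw [PySem.List.mem_pyRange_one] at hj; simp only [decide_eq_true_eq]; omega)]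
    simp

lemma region1 (n i : Int) (h0 : 0 ≤ i) :
    (PySem.List.pyRange 0 n 1).filter (fun j => decide (i < j ∧ i + j < n - 1))
    = PySem.List.pyRange (i + 1) (n - 1 - i) 1 := by
  rw [List.filter_congr (q := fun j => decide (i + 1 ≤ j ∧ j < n - 1 - i))
      (fun j _ => by simp only [decide_eq_decide]; omega), filter_pyRange_interval]
  congr 1 <;> omega

lemma region2 (n i : Int) (h0 : 0 ≤ i) :
    (PySem.List.pyRange 0 n 1).filter (fun j => decide (i < j ∧ i + j > n - 1))
    = PySem.List.pyRange (max (i + 1) (n - i)) n 1 := by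
  rw [List.filter_congr (q := fun j => decide (max (i + 1) (n - i) ≤ j ∧ j < n))
      (fun j hj => by
        rw [PySem.List.mem_pyRange_one] at hj
        simp only [decide_eq_decide]
        omega),
      filter_pyRange_interval]
  congr 1 <;> omega

lemma region3 (n i : Int) (h0 : 0 ≤ i) (h1 : i < n) :
    (PySem.List.pyRange 0 n 1).filter (fun j => decide (i > j ∧ i + j > n - 1))
    = PySem.List.pyRange (n - i) i 1 := by
  rw [List.filter_congr (q := fun j => decide (n - i ≤ j ∧ j < i))
      (fun j _ => by simp only [decide_eq_decide]; omega), filter_pyRange_interval]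
  congr 1 <;> omega

lemma region4 (n i : Int) (h0 : 0 ≤ i) :
    (PySem.List.pyRange 0 n 1).filter (fun j => decide (i > j ∧ i + j < n - 1))
    = PySem.List.pyRange 0 (min i (n - 1 - i)) 1 := by
  rw [List.filter_congr (q := fun j => decide (0 ≤ j ∧ j < min i (n - 1 - i)))
      (fun j hj => by
        rw [PySem.List.mem_pyRange_one] at hj
        simp only [decide_eq_decide]
        omega),
      filter_pyRange_interval]
  congr 1 <;> omega

-- ===== VERDICT (by name: the statement is the Claim_ definition above) =====
theorem get_diagonal_regions_spec : Claim_equal_get_diagonal_regions := by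
  intro n _
  unfold Spec_get_diagonal_regions get_diagonal_regions get_diagonal_regions_alt
  have hfun : ∀ (s : (List (Int × Int)) × (List (Int × Int)) × (List (Int × Int)) × (List (Int × Int))),
      ∀ i ∈ PySem.List.pyRange 0 n 1,
      (PySem.List.pyRange 0 n 1).foldl (fun s j =>
        if i < j ∧ i + j < n - 1 then (s.1 ++ [(i, j)], s.2.1, s.2.2.1, s.2.2.2)
        else if i < j ∧ i + j > n - 1 then (s.1, s.2.1 ++ [(i, j)], s.2.2.1, s.2.2.2)
        else if i > j ∧ i + j > n - 1 then (s.1, s.2.1, s.2.2.1 ++ [(i, j)], s.2.2.2)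
        else if i > j ∧ i + j < n - 1 then (s.1, s.2.1, s.2.2.1, s.2.2.2 ++ [(i, j)])
        else s) s
      = (s.1 ++ (PySem.List.pyRange (i + 1) (n - 1 - i) 1).map (fun j => (i, j)),
         s.2.1 ++ (PySem.List.pyRange (max (i + 1) (n - i)) n 1).map (fun j => (i, j)),
         s.2.2.1 ++ (PySem.List.pyRange (n - i) i 1).map (fun j => (i, j)),
         s.2.2.2 ++ (PySem.List.pyRange 0 (min i (n - 1 - i)) 1).map (fun j => (i, j))) := by
    intro s i hi
    obtain ⟨a, b, c, d⟩ := s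
    rw [PySem.List.mem_pyRange_one] at hi
    rw [inner_loop, region1 n i hi.1, region2 n i hi.1, region3 n i hi.1 hi.2,
        region4 n i hi.1]
  rw [PySem.List.foldl_congr_mem _ _ _ _ hfun, quad_append_foldl]
  simp
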